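-- pv_equiv track=rewrite | github.com/ITRS-Group/ov_cmdb_sync | ov_cmdb_sync/util.py | mixed_to_upper_underscore
-- ===== SOURCE A (Python) =====
-- def mixed_to_upper_underscore(mixed_str):
--     """Convert a mixed case string to upper case with underscores."""
--     words = []
--     start = 0
--
--     for i in range(1, len(mixed_str)):
--         if mixed_str[i].isupper() and mixed_str[i - 1].islower():
--             words.append(mixed_str[start:i])
--             start = i
--         elif mixed_str[i] == "_":
--             words.append(mixed_str[start:i])
--             start = i + 1
--
--     words.append(mixed_str[start:])
--     return "_".join(words).upper()
-- ===== SOURCE B (Python) =====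
-- def mixed_to_upper_underscore(mixed_str):
--     """Convert a mixed case string to upper case with underscores."""
--     parts = []
--     prev_lower = False
--     for ch in mixed_str:
--         if prev_lower and ch.isupper():
--             parts.append("_")
--         parts.append(ch)
--         prev_lower = ch.islower()
--     return "".join(parts).upper()
-- ===== Notes on version B (the rewrite author's own statement) =====
-- stated objective: simpler
-- what changed: B builds the result in one left-to-right pass that inserts an underscore before an upper-case char preceded by a lower-case one (existing underscores copy through unchanged), replacing A's segment-collecting with slices, a second underscore branch and an underscore-join.
import Mathlib
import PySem

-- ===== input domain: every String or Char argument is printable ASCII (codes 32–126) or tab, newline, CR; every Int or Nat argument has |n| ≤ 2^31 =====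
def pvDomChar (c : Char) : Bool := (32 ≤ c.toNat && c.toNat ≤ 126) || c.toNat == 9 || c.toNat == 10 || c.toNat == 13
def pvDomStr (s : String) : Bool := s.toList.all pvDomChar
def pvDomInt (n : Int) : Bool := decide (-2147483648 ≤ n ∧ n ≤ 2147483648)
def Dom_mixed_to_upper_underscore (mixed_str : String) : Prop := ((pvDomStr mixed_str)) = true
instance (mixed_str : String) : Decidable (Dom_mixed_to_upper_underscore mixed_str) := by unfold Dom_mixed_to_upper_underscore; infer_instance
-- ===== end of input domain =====

-- B replaces A's segment-collecting + '_'.join with a single pass inserting '_' at lower→upper boundaries (objective: simpler).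

-- ===== PORT A =====
-- the for-loop over range(1, len(mixed_str)) with state (words, start)
def pvCutA (cs : List Char) (i start : Nat) (words : List (List Char)) : List (List Char) × Nat :=
  if h : i < cs.length then
    if PySem.Chars.isupper cs[i] && PySem.Chars.islower (cs[i-1]'(by omega)) then
      pvCutA cs (i+1) i (words ++ [PySem.List.slice cs (some (start : Int)) (some (i : Int))])
    else if cs[i] = '_' then
      pvCutA cs (i+1) (i+1) (words ++ [PySem.List.slice cs (some (start : Int)) (some (i : Int))])
    else
      pvCutA cs (i+1) start words
  else
    (words, start)
termination_by cs.length - i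

def mixed_to_upper_underscore (mixed_str : String) : String :=
  let cs := mixed_str.toList
  let p := pvCutA cs 1 0 []
  let words := p.1 ++ [PySem.List.slice cs (some (p.2 : Int)) none]
  String.mk (PySem.Chars.upper (PySem.Chars.join ['_'] words))

-- ===== PORT B =====
def mixed_to_upper_underscore_alt (mixed_str : String) : String :=
  let p := mixed_str.toList.foldl
    (fun acc c =>
      (acc.1 ++ (if acc.2 && PySem.Chars.isupper c then ['_', c] else [c]),
       PySem.Chars.islower c))
    (([] : List Char), false)
  String.mk (PySem.Chars.upper p.1)

-- ===== PRECONDITION & SPEC =====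
def Spec_mixed_to_upper_underscore (mixed_str : String) (out : String) : Prop := out = mixed_to_upper_underscore_alt mixed_str
instance (mixed_str : String) (out : String) : Decidable (Spec_mixed_to_upper_underscore mixed_str out) := by unfold Spec_mixed_to_upper_underscore; infer_instance

-- ===== CLAIM (what is proved, stated in full; the proofs are below) =====
def Claim_equal_mixed_to_upper_underscore : Prop := ∀ (mixed_str : String), Dom_mixed_to_upper_underscore mixed_str → Spec_mixed_to_upper_underscore mixed_str (mixed_to_upper_underscore mixed_str)

-- ===== LEMMAS AND PROOFS =====

-- B's per-char output, with the previous char abstracted to "was it lower-case"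
def pvMid (prevLow : Bool) : List Char → List Char
  | [] => []
  | c :: rest => (if prevLow && PySem.Chars.isupper c then ['_', c] else [c]) ++ pvMid (PySem.Chars.islower c) rest

lemma pvFoldB (l : List Char) (acc : List Char) (prevLow : Bool) :
    (l.foldl (fun acc c =>
      (acc.1 ++ (if acc.2 && PySem.Chars.isupper c then ['_', c] else [c]),
       PySem.Chars.islower c)) (acc, prevLow)).1 = acc ++ pvMid prevLow l := by
  induction l generalizing acc prevLow with
  | nil => simp [pvMid]
  | cons c rest ih =>
    simp only [List.foldl, pvMid]
    rw [ih]
    simp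

lemma pvJoinSnoc (ws : List (List Char)) (x : List Char) :
    PySem.Chars.join ['_'] (ws ++ [x]) =
      PySem.Chars.join ['_'] ws ++ (if ws = [] then [] else ['_']) ++ x := by
  induction ws with
  | nil => simp [PySem.Chars.join_nil, PySem.Chars.join_singleton]
  | cons a t ih =>
    cases t with
    | nil =>
      simp [PySem.Chars.join_singleton, PySem.Chars.join_cons_cons]
    | cons b t' =>
      simp only [List.cons_append] at ih ⊢
      rw [PySem.Chars.join_cons_cons, ih, PySem.Chars.join_cons_cons]
      simp

lemma pvSliceNat (cs : List Char) (a b : Nat) :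
    PySem.List.slice cs (some (a : Int)) (some (b : Int)) = (cs.drop a).take (b - a) := by
  rw [PySem.List.slice_toNat]
  · simp
  all_goals positivity

lemma pvCutA_main (cs : List Char) (i start : Nat) (words : List (List Char))
    (h1 : 1 ≤ i) (h2 : i ≤ cs.length) (h3 : start ≤ i) :
    PySem.Chars.join ['_'] ((pvCutA cs i start words).1 ++
        [PySem.List.slice cs (some ((pvCutA cs i start words).2 : Int)) none]) =
      PySem.Chars.join ['_'] words ++ (if words = [] then [] else ['_']) ++
        (cs.drop start).take (i - start) ++
        pvMid (PySem.Chars.islower (cs[i-1]'(by omega))) (cs.drop i) := by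
  by_cases h : i < cs.length
  · rw [pvCutA, dif_pos h]
    have hdrop : cs.drop i = cs[i] :: cs.drop (i+1) := List.drop_eq_getElem_cons h
    by_cases hc : (PySem.Chars.isupper cs[i] && PySem.Chars.islower (cs[i-1]'(by omega))) = true
    · rw [if_pos hc]
      rw [pvCutA_main cs (i+1) i _ (by omega) (by omega) (by omega)]
      rw [pvJoinSnoc, pvSliceNat]
      have : pvMid (PySem.Chars.islower (cs[i-1]'(by omega))) (cs.drop i) =
          '_' :: cs[i] :: pvMid (PySem.Chars.islower cs[i]) (cs.drop (i+1)) := by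
        rw [hdrop]
        simp only [pvMid]
        rw [Bool.and_comm] at hc
        rw [if_pos hc]; rfl
      rw [this]
      have h1t : List.take (i + 1 - i) (List.drop i cs) = [cs[i]] := by
        rw [show i + 1 - i = 1 from by omega, hdrop, List.take_succ_cons, List.take_zero]
      rw [h1t]
      simp only [Nat.add_sub_cancel]
      simp [List.append_assoc]
    · rw [if_neg hc]
      by_cases hu : cs[i] = '_'
      · rw [if_pos hu]
        rw [pvCutA_main cs (i+1) (i+1) _ (by omega) (by omega) (by omega)]
        rw [pvJoinSnoc, pvSliceNat]
        have : pvMid (PySem.Chars.islower (cs[i-1]'(by omega))) (cs.drop i) =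
            '_' :: pvMid false (cs.drop (i+1)) := by
          rw [hdrop, hu]
          simp [pvMid, PySem.Chars.isupper, PySem.Chars.islower]
        rw [this]
        have hlow : PySem.Chars.islower '_' = false := by decide
        simp [hu, hlow, List.append_assoc]
      · rw [if_neg hu]
        rw [pvCutA_main cs (i+1) start _ (by omega) (by omega) (by omega)]
        have hmid : pvMid (PySem.Chars.islower (cs[i-1]'(by omega))) (cs.drop i) =
            cs[i] :: pvMid (PySem.Chars.islower cs[i]) (cs.drop (i+1)) := by
          rw [hdrop]
          simp only [pvMid]
          rw [Bool.and_comm] at hc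
          rw [if_neg hc]; rfl
        have htake : (cs.drop start).take (i + 1 - start) =
            (cs.drop start).take (i - start) ++ [cs[i]] := by
          have heq : i + 1 - start = (i - start) + 1 := by omega
          have hlt : i - start < (cs.drop start).length := by
            simp [List.length_drop]; omega
          rw [heq, List.take_add_one]
          simp [List.getElem?_eq_getElem hlt]
          congr 1
          omega
        rw [hmid, htake]
        simp
  · have hi : i = cs.length := by omega
    rw [pvCutA, dif_neg h]
    simp only
    rw [pvJoinSnoc]
    rw [PySem.List.slice_from]
    have : (cs.drop start).take (i - start) = cs.drop start := by
      apply List.take_of_length_le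
      simp [List.length_drop]; omega
    rw [this]
    simp [hi, pvMid]
    positivity
termination_by cs.length - i

-- ===== VERDICT (by name: the statement is the Claim_ definition above) =====
theorem mixed_to_upper_underscore_spec : Claim_equal_mixed_to_upper_underscore := by
  intro s _
  unfold Spec_mixed_to_upper_underscore mixed_to_upper_underscore mixed_to_upper_underscore_alt
  simp only
  rw [pvFoldB]
  cases hcs : s.toList with
  | nil => simp [pvCutA, pvMid, PySem.List.slice, PySem.Chars.join_singleton]
  | cons c rest =>
    have hlen : 1 ≤ (c :: rest).length := by simp
    rw [pvCutA_main (c :: rest) 1 0 [] le_rfl hlen (by omega)]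
    simp [pvMid]
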